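-- pv_equiv track=rewrite | github.com/miliar/Code_Jam_Webscraper | Solutions_python/Problem_200/2526.py | propogate
-- ===== SOURCE A (Python) =====
-- def propogate(digit_listB):
-- 	digit_listB = list(reversed(digit_listB))
-- 	fin = 0
-- 	for idx, item in enumerate(digit_listB):
-- 		if idx == len(digit_listB)-1:
-- 			break
-- 		if digit_listB[idx] <= digit_listB[idx+1]:
-- 			continue
-- 		else:
-- 			digit_listB[idx] = digit_listB[idx] - 1
-- 			while idx < len(digit_listB)-1:
-- 				idx = idx + 1
-- 				digit_listB[idx] = 9
-- 			for item in digit_listB: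
-- 				fin = fin*10 + item
-- 			return fin
-- 	del digit_listB[:]
-- 	return fin
-- ===== SOURCE B (Python) =====
-- def propogate(digit_listB):
--     rev = digit_listB[::-1]
--     n = len(rev)
--     P = 0
--     for i in range(n - 1):
--         if rev[i] > rev[i + 1]:
--             k = n - 1 - i
--             return (P * 10 + rev[i] - 1) * 10 ** k + 10 ** k - 1
--         P = P * 10 + rev[i]
--     return 0
-- ===== Notes on version B (the rewrite author's own statement) =====
-- stated objective: simpler
-- what changed: Single pass over the reversed digits accumulating the unchanged prefix value by Horner; at the first descent the answer is produced by a closed-form power-of-ten formula instead of mutating the list, filling 9s and running a second Horner rebuild loop.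
import Mathlib
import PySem

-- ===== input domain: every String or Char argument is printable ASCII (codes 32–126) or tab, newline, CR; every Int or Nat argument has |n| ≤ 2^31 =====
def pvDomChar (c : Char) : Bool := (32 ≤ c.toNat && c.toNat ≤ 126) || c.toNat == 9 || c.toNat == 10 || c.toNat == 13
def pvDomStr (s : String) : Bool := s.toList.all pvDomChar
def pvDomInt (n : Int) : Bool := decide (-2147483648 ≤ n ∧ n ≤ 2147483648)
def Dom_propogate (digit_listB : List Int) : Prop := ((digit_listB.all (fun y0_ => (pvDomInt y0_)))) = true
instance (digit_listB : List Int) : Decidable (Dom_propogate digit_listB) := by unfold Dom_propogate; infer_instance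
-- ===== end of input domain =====

-- B replaces A's in-place nine-fill and second Horner rebuild loop with one pass and a
-- closed-form power-of-ten formula at the first descent (objective: simpler).


-- ===== PORT A =====
-- A's final "for item in digit_listB: fin = fin*10 + item" loop
def pyHornerA (l : List Int) : Int := l.foldl (fun fin item => fin * 10 + item) 0

-- A's index loop: `pre` is the already-scanned prefix of the reversed list (unchanged so far);
-- on a descent the pivot is decremented, the tail is overwritten with 9s, and the whole
-- (mutated) list is folded by the Horner loop, exactly as A does.
def goA (pre : List Int) : List Int → Int
  | a :: b :: rest =>
      if a ≤ b then goA (pre ++ [a]) (b :: rest)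
      else pyHornerA (pre ++ [a - 1] ++ List.replicate (rest.length + 1) 9)
  | _ => 0

def propogate (digit_listB : List Int) : Int := goA [] digit_listB.reverse

-- ===== PORT B =====
-- B's single pass: P is the Horner value of the scanned prefix; at the first descent the
-- result is produced in closed form.
def goB (P : Int) : List Int → Int
  | a :: b :: rest =>
      if a > b then
        let k := rest.length + 1
        (P * 10 + a - 1) * 10 ^ k + 10 ^ k - 1
      else goB (P * 10 + a) (b :: rest)
  | _ => 0

def propogate_alt (digit_listB : List Int) : Int := goB 0 digit_listB.reverse

-- ===== PRECONDITION & SPEC =====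
def Spec_propogate (digit_listB : List Int) (out : Int) : Prop := out = propogate_alt digit_listB
instance (digit_listB : List Int) (out : Int) : Decidable (Spec_propogate digit_listB out) := by unfold Spec_propogate; infer_instance

-- ===== CLAIM (what is proved, stated in full; the proofs are below) =====
def Claim_equal_propogate : Prop := ∀ (digit_listB : List Int), Dom_propogate digit_listB → Spec_propogate digit_listB (propogate digit_listB)

-- ===== LEMMAS AND PROOFS =====
theorem hornerA_replicate9 (c : Int) (k : Nat) :
    List.foldl (fun fin item => fin * 10 + item) c (List.replicate k 9) = c * 10 ^ k + (10 ^ k - 1) := by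
  induction k generalizing c with
  | zero => simp
  | succ k ih =>
      rw [List.replicate_succ, List.foldl_cons, ih]
      ring

theorem goA_eq_goB (l pre : List Int) : goA pre l = goB (pyHornerA pre) l := by
  induction l generalizing pre with
  | nil => simp [goA, goB]
  | cons a t ih =>
      cases t with
      | nil => simp [goA, goB]
      | cons b rest =>
          by_cases h : a ≤ b
          · have hgt : ¬ a > b := by omega
            rw [goA, goB, if_pos h, if_neg hgt, ih]
            congr 1
            simp [pyHornerA, List.foldl_append]
          · have hgt : a > b := by omega
            rw [goA, goB, if_neg h, if_pos hgt]
            simp only [pyHornerA, List.foldl_append, List.foldl_cons, List.foldl_nil,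
              hornerA_replicate9]
            ring

-- ===== VERDICT (by name: the statement is the Claim_ definition above) =====
theorem propogate_spec : Claim_equal_propogate := by
  intro l _
  unfold Spec_propogate propogate propogate_alt
  simpa [pyHornerA] using goA_eq_goB l.reverse []
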